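-- pv_equiv track=rewrite | github.com/June0619/dingorithm | 5th_week/01_line_catch_me.py | catch_me
-- ===== SOURCE A (Python) =====
-- from collections import deque
--
-- def get_cur_ac(time):
--     result = 0
--     for n in range(1, time + 1):
--         result += n
--     return result
--
-- def catch_me(cony_loc, brown_loc):
--
--     location_queue = deque()
--     location_queue.append((brown_loc, 0))
--     while True:
--         cur_status = location_queue.popleft()
--         cur_brown_loc = cur_status[0]
--         cur_time = cur_status[1]
--         cur_ac = get_cur_ac(cur_time)
--         cur_cony_loc = cony_loc + cur_ac
--
--         if cur_brown_loc == cur_cony_loc: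
--             return cur_time
--         if cur_cony_loc > 200_000:
--             return cur_time
--
--         cur_time += 1
--
--         move_back_loc = cur_brown_loc - 1
--         move_forward_loc = cur_brown_loc + 1
--         move_twice_loc = cur_brown_loc * 2
--
--         if move_back_loc >= 0 and (move_back_loc, cur_time) not in location_queue:
--             location_queue.append((move_back_loc, cur_time))
--
--         if move_forward_loc <= 200_000 and (move_forward_loc, cur_time) not in location_queue:
--             location_queue.append((move_forward_loc, cur_time))
--
--         if move_twice_loc <= 200_000 and (move_twice_loc, cur_time) not in location_queue:
--             location_queue.append((move_twice_loc, cur_time))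
-- ===== SOURCE B (Python) =====
-- def catch_me(cony_loc, brown_loc):
--     # Level-by-level BFS: a set of Brown's reachable positions per time step,
--     # Cony's position from the closed-form triangular number.
--     cur = {brown_loc}
--     t = 0
--     while True:
--         cony = cony_loc + t * (t + 1) // 2
--         if cony > 200000 or cony in cur:
--             return t
--         nxt = set()
--         for p in cur:
--             if p - 1 >= 0:
--                 nxt.add(p - 1)
--             if p + 1 <= 200000:
--                 nxt.add(p + 1)
--             if p * 2 <= 200000:
--                 nxt.add(p * 2)
--         cur = nxt
--         t += 1
-- ===== Notes on version B (the rewrite author's own statement) =====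
-- stated objective: alternative
-- what changed: Replaces the single deque with linear membership scans and a re-summed 1..t loop per pop by a level-at-a-time BFS over a hash set with Cony's position computed as the closed-form triangular number t*(t+1)//2; the per-operation costs drop but typical generated inputs return after one level, so no speed is claimed.
import Mathlib
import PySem

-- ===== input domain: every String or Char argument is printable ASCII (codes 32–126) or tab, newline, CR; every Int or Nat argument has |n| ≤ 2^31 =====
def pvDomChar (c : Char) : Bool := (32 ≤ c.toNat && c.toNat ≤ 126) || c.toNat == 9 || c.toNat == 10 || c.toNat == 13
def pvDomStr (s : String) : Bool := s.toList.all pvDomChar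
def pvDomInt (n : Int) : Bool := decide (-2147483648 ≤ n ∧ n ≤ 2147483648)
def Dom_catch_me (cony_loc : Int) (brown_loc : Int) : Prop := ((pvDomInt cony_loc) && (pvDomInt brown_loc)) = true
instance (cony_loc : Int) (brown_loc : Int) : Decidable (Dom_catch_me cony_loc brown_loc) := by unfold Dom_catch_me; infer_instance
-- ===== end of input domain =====

-- B replaces A's single deque (with linear membership scans and a re-summed 1..t loop
-- per pop) by a level-at-a-time BFS over a set, with Cony's position as the closed-form
-- triangular number; same return value on all of Dom.

-- ===== PORT A =====
-- helper: get_cur_ac(time) — the summation loop, literally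
def get_cur_ac (time : Int) : Int :=
  (PySem.List.pyRange 1 (time + 1) 1).foldl (fun result n => result + n) 0

-- the `while True` loop over the deque; fuel only makes the recursion total —
-- 4 ^ 65602 is proven sufficient for every input in Dom (the value never depends on it there)
def catchLoop (cony_loc : Int) : Nat → List (Int × Nat) → Int
  | 0, _ => 0
  | _ + 1, [] => 0
  | fuel + 1, (cur_brown_loc, cur_time) :: rest =>
      let cur_ac := get_cur_ac (cur_time : Int)
      let cur_cony_loc := cony_loc + cur_ac
      if cur_brown_loc = cur_cony_loc then (cur_time : Int)
      else if cur_cony_loc > 200000 then (cur_time : Int)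
      else
        let q1 := if cur_brown_loc - 1 ≥ 0 ∧ (cur_brown_loc - 1, cur_time + 1) ∉ rest
                  then rest ++ [(cur_brown_loc - 1, cur_time + 1)] else rest
        let q2 := if cur_brown_loc + 1 ≤ 200000 ∧ (cur_brown_loc + 1, cur_time + 1) ∉ q1
                  then q1 ++ [(cur_brown_loc + 1, cur_time + 1)] else q1
        let q3 := if cur_brown_loc * 2 ≤ 200000 ∧ (cur_brown_loc * 2, cur_time + 1) ∉ q2
                  then q2 ++ [(cur_brown_loc * 2, cur_time + 1)] else q2
        catchLoop cony_loc fuel q3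

def catch_me (cony_loc : Int) (brown_loc : Int) : Int :=
  catchLoop cony_loc (4 ^ 65602) [(brown_loc, 0)]

-- ===== PORT B =====
-- one position's children added into the next level's set
def altStep (nxt : PySem.Set Int) (p : Int) : PySem.Set Int :=
  let n1 := if p - 1 ≥ 0 then PySem.Set.add nxt (p - 1) else nxt
  let n2 := if p + 1 ≤ 200000 then PySem.Set.add n1 (p + 1) else n1
  if p * 2 ≤ 200000 then PySem.Set.add n2 (p * 2) else n2

-- termination helper cited by altLoop's decreasing_by: the triangular number grows by t+1
lemma tri_floordiv_succ (t : Nat) :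
    PySem.Int.floordiv ((↑(t + 1) : Int) * ((↑(t + 1) : Int) + 1)) 2
      = PySem.Int.floordiv ((t : Int) * ((t : Int) + 1)) 2 + (t + 1) := by
  rw [PySem.Int.floordiv_eq_ediv_of_pos (by norm_num), PySem.Int.floordiv_eq_ediv_of_pos (by norm_num)]
  push_cast
  have key : ((t : Int) + 1) * ((t : Int) + 1 + 1) = (t : Int) * ((t : Int) + 1) + 2 * ((t : Int) + 1) := by ring
  rw [key]
  generalize (t : Int) * ((t : Int) + 1) = a
  omega

def altLoop (cony_loc : Int) (cur : PySem.Set Int) (t : Nat) : Int :=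
  let cony := cony_loc + PySem.Int.floordiv ((t : Int) * ((t : Int) + 1)) 2
  if h : 200000 < cony ∨ cony ∈ cur then (t : Int)
  else altLoop cony_loc (cur.foldl altStep PySem.Set.empty) (t + 1)
termination_by (200001 - (cony_loc + PySem.Int.floordiv ((t : Int) * ((t : Int) + 1)) 2)).toNat
decreasing_by
  rw [not_or] at h
  rw [tri_floordiv_succ t]
  have := h.1
  omega

def catch_me_alt (cony_loc : Int) (brown_loc : Int) : Int :=
  altLoop cony_loc (PySem.Set.ofList [brown_loc]) 0

-- ===== PRECONDITION & SPEC =====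
def Spec_catch_me (cony_loc : Int) (brown_loc : Int) (out : Int) : Prop := out = catch_me_alt cony_loc brown_loc
instance (cony_loc : Int) (brown_loc : Int) (out : Int) : Decidable (Spec_catch_me cony_loc brown_loc out) := by unfold Spec_catch_me; infer_instance

-- ===== CLAIM (what is proved, stated in full; the proofs are below) =====
def Claim_equal_catch_me : Prop := ∀ (cony_loc : Int) (brown_loc : Int), Dom_catch_me cony_loc brown_loc → Spec_catch_me cony_loc brown_loc (catch_me cony_loc brown_loc)

-- ===== LEMMAS AND PROOFS =====

-- the triangular number as a Nat, and Cony's position at time t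
def triN (t : Nat) : Nat := t * (t + 1) / 2

def cpos (cony : Int) (t : Nat) : Int := cony + (triN t : Int)

lemma triN_succ (t : Nat) : triN (t + 1) = triN t + (t + 1) := by
  unfold triN
  have key : (t + 1) * (t + 1 + 1) = t * (t + 1) + 2 * (t + 1) := by ring
  rw [key]
  generalize t * (t + 1) = a
  omega

lemma floordiv_tri (t : Nat) :
    PySem.Int.floordiv ((t : Int) * ((t : Int) + 1)) 2 = (triN t : Int) := by
  have h1 : ((t : Int) * ((t : Int) + 1)) = ((t * (t + 1) : Nat) : Int) := by push_cast; ring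
  rw [h1]
  exact_mod_cast PySem.Int.floordiv_natCast (t * (t + 1)) 2

lemma get_cur_ac_eq (t : Nat) : get_cur_ac (t : Int) = (triN t : Int) := by
  induction t with
  | zero => decide
  | succ n ih =>
      unfold get_cur_ac at *
      have hr : PySem.List.pyRange 1 ((↑(n + 1) : Int) + 1) 1
          = PySem.List.pyRange 1 ((n : Int) + 1) 1 ++ [(n : Int) + 1] := by
        push_cast
        exact PySem.List.pyRange_one_succ_right (by omega)
      rw [hr, List.foldl_append]
      simp only [List.foldl_cons, List.foldl_nil]
      rw [ih, triN_succ]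
      push_cast
      ring

-- one conditional dedup-append on the queue = Set.add on the next-level part
lemma push_one (t : Nat) (S N : List Int) (c : Prop) [Decidable c] (x : Int) :
    (if c ∧ (x, t + 1) ∉ (S.map (fun p => (p, t)) ++ N.map (fun p => (p, t + 1)))
     then (S.map (fun p => (p, t)) ++ N.map (fun p => (p, t + 1))) ++ [(x, t + 1)]
     else (S.map (fun p => (p, t)) ++ N.map (fun p => (p, t + 1))))
    = S.map (fun p => (p, t)) ++ (if c then PySem.Set.add N x else N).map (fun p => (p, t + 1)) := by
  by_cases hc : c
  · by_cases hx : x ∈ N <;> simp [hc, hx, PySem.Set.add]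
  · simp [hc]

lemma add_ne_nil (s : List Int) (x : Int) : PySem.Set.add s x ≠ [] := by
  rcases s with _ | ⟨a, l⟩ <;> simp [PySem.Set.add] <;> split <;> simp

lemma altStep_ne_nil (N : List Int) (p : Int) : altStep N p ≠ [] := by
  unfold altStep
  split_ifs with h1 h2 h3 <;> first | exact add_ne_nil _ _ | omega

lemma add_len (s : List Int) (x : Int) :
    s.length ≤ (PySem.Set.add s x).length ∧ (PySem.Set.add s x).length ≤ s.length + 1 := by
  simp [PySem.Set.add]; split <;> simp

lemma addIf_len (m : List Int) (x : Int) (c : Prop) [Decidable c] :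
    m.length ≤ (if c then PySem.Set.add m x else m).length ∧
      (if c then PySem.Set.add m x else m).length ≤ m.length + 1 := by
  split
  · exact add_len m x
  · omega

lemma altStep_len (N : List Int) (p : Int) :
    N.length ≤ (altStep N p).length ∧ (altStep N p).length ≤ N.length + 3 := by
  unfold altStep
  dsimp only
  obtain ⟨h1a, h1b⟩ := addIf_len N (p - 1) (p - 1 ≥ 0)
  obtain ⟨h2a, h2b⟩ := addIf_len (if p - 1 ≥ 0 then PySem.Set.add N (p - 1) else N) (p + 1)
    (p + 1 ≤ 200000)
  obtain ⟨h3a, h3b⟩ :=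
    addIf_len
      (if p + 1 ≤ 200000 then
        PySem.Set.add (if p - 1 ≥ 0 then PySem.Set.add N (p - 1) else N) (p + 1)
      else if p - 1 ≥ 0 then PySem.Set.add N (p - 1) else N)
      (p * 2) (p * 2 ≤ 200000)
  constructor <;> omega

lemma foldl_altStep_len (S N : List Int) :
    N.length ≤ (S.foldl altStep N).length ∧ (S.foldl altStep N).length ≤ N.length + 3 * S.length := by
  induction S generalizing N with
  | nil => simp
  | cons p S ih =>
      simp only [List.foldl_cons, List.length_cons]
      obtain ⟨a1, a2⟩ := altStep_len N p
      obtain ⟨b1, b2⟩ := ih (altStep N p)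
      constructor <;> omega

lemma foldl_altStep_ne_nil (S N : List Int) (h : S ≠ []) : S.foldl altStep N ≠ [] := by
  rcases S with _ | ⟨p, S⟩
  · exact absurd rfl h
  · simp only [List.foldl_cons]
    have h1 := altStep_ne_nil N p
    have h2 := (foldl_altStep_len S (altStep N p)).1
    intro hnil
    rw [hnil] at h2
    simp only [List.length_nil, Nat.le_zero, List.length_eq_zero_iff] at h2
    exact h1 h2

-- one whole BFS level of A: pop every time-t entry, collecting the deduplicated
-- next level, which is exactly B's fold of altStep
lemma level_proc (cony : Int) (t : Nat) (S : List Int) :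
    ∀ (N : List Int) (fuel : Nat), S.length ≤ fuel → cpos cony t ≤ 200000 →
      catchLoop cony fuel (S.map (fun p => (p, t)) ++ N.map (fun p => (p, t + 1))) =
        if cpos cony t ∈ S then (t : Int)
        else catchLoop cony (fuel - S.length) ((S.foldl altStep N).map (fun p => (p, t + 1))) := by
  induction S with
  | nil => intro N fuel _ _; simp
  | cons p S ih =>
      intro N fuel hlen hle
      rcases fuel with _ | fuel
      · simp at hlen
      simp only [List.length_cons] at hlen
      rw [show cpos cony t ≤ 200000 ↔ cony + ((triN t : Nat) : Int) ≤ 200000 from Iff.rfl] at hle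
      simp only [List.map_cons, List.cons_append, catchLoop, get_cur_ac_eq]
      rw [push_one t S N (p - 1 ≥ 0) (p - 1)]
      rw [push_one t S _ (p + 1 ≤ 200000) (p + 1)]
      rw [push_one t S _ (p * 2 ≤ 200000) (p * 2)]
      by_cases hp : p = cony + ((triN t : Nat) : Int)
      · rw [if_pos hp, if_pos (show cpos cony t ∈ p :: S by simp [cpos, ← hp])]
      · rw [if_neg hp, if_neg (by omega)]
        have hs :
            (if p * 2 ≤ 200000 then
              PySem.Set.add
                (if p + 1 ≤ 200000 then
                  PySem.Set.add (if p - 1 ≥ 0 then PySem.Set.add N (p - 1) else N) (p + 1)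
                else if p - 1 ≥ 0 then PySem.Set.add N (p - 1) else N) (p * 2)
            else
              if p + 1 ≤ 200000 then
                PySem.Set.add (if p - 1 ≥ 0 then PySem.Set.add N (p - 1) else N) (p + 1)
              else if p - 1 ≥ 0 then PySem.Set.add N (p - 1) else N) = altStep N p := rfl
        rw [hs, ih (altStep N p) fuel (by omega) hle]
        have hmem : (cpos cony t ∈ p :: S) ↔ (cpos cony t ∈ S) := by
          simp only [List.mem_cons]
          constructor
          · rintro (h | h)
            · exact absurd h.symm hp
            · exact h
          · exact Or.inr
        simp only [hmem, List.foldl_cons, List.length_cons]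
        have harith : fuel + 1 - (S.length + 1) = fuel - S.length := by omega
        rw [harith]

-- unfolding altLoop once, with the triangular floordiv rewritten to cpos
lemma altLoop_eq (cony : Int) (cur : PySem.Set Int) (t : Nat) :
    altLoop cony cur t =
      if 200000 < cpos cony t ∨ cpos cony t ∈ cur then (t : Int)
      else altLoop cony (cur.foldl altStep PySem.Set.empty) (t + 1) := by
  rw [altLoop]
  simp only [floordiv_tri]
  rfl

-- the whole BFS, level by level: A's fueled deque loop equals B's level loop,
-- for any fuel ≥ |S| * 4 ^ k where level t + k is past Cony's escape point
lemma main_loop (cony : Int) (k : Nat) :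
    ∀ (t : Nat) (S : List Int) (fuel : Nat),
      S ≠ [] → 200000 < cpos cony (t + k) → S.length * 4 ^ k ≤ fuel →
      catchLoop cony fuel (S.map (fun p => (p, t))) = altLoop cony S t := by
  induction k with
  | zero =>
      intro t S fuel hne hesc hfuel
      rcases S with _ | ⟨p, S⟩
      · exact absurd rfl hne
      rcases fuel with _ | fuel
      · simp at hfuel
      rw [altLoop_eq]
      rw [if_pos (Or.inl (by simpa using hesc))]
      simp only [List.map_cons, catchLoop, get_cur_ac_eq]
      have hgt : cony + ((triN t : Nat) : Int) > 200000 := by simpa [cpos] using hesc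
      by_cases hp : p = cony + ((triN t : Nat) : Int)
      · rw [if_pos hp]
      · rw [if_neg hp, if_pos hgt]
  | succ k ih =>
      intro t S fuel hne hesc hfuel
      rw [altLoop_eq]
      have hfl : S.length ≤ fuel := by
        have h1 : 1 ≤ 4 ^ (k + 1) := Nat.one_le_pow _ _ (by norm_num)
        calc S.length = S.length * 1 := (Nat.mul_one _).symm
          _ ≤ S.length * 4 ^ (k + 1) := Nat.mul_le_mul_left _ h1
          _ ≤ fuel := hfuel
      by_cases hc : 200000 < cpos cony t
      · rw [if_pos (Or.inl hc)]
        rcases S with _ | ⟨p, S⟩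
        · exact absurd rfl hne
        rcases fuel with _ | fuel
        · simp at hfl
        simp only [List.map_cons, catchLoop, get_cur_ac_eq]
        by_cases hp : p = cony + ((triN t : Nat) : Int)
        · rw [if_pos hp]
        · rw [if_neg hp, if_pos (by simpa [cpos] using hc)]
      · have hproc := level_proc cony t S [] fuel hfl (by omega)
        simp only [List.map_nil, List.append_nil] at hproc
        rw [hproc]
        by_cases hm : cpos cony t ∈ S
        · rw [if_pos hm, if_pos (Or.inr hm)]
        · rw [if_neg hm, if_neg (by tauto)]
          rw [show (PySem.Set.empty : PySem.Set Int) = ([] : List Int) from rfl]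
          apply ih (t + 1) (S.foldl altStep []) (fuel - S.length)
            (foldl_altStep_ne_nil S [] hne) ?_ ?_
          · rw [show t + 1 + k = t + (k + 1) from by omega]
            exact hesc
          · have hlen3 := (foldl_altStep_len S []).2
            simp only [List.length_nil, Nat.zero_add] at hlen3
            apply Nat.le_sub_of_add_le
            have c1 : (S.foldl altStep []).length * 4 ^ k ≤ 3 * S.length * 4 ^ k :=
              Nat.mul_le_mul_right _ hlen3
            have c2 : S.length ≤ S.length * 4 ^ k :=
              Nat.le_mul_of_pos_right _ (by positivity)
            calc (S.foldl altStep []).length * 4 ^ k + S.length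
                ≤ 3 * S.length * 4 ^ k + S.length * 4 ^ k := Nat.add_le_add c1 c2
              _ = S.length * 4 ^ (k + 1) := by ring
              _ ≤ fuel := hfuel


-- ===== VERDICT (by name: the statement is the Claim_ definition above) =====
theorem catch_me_spec : Claim_equal_catch_me := by
  intro cony_loc brown_loc hdom
  unfold Spec_catch_me catch_me catch_me_alt
  have hset : PySem.Set.ofList [brown_loc] = [brown_loc] := by
    simp [PySem.Set.ofList, PySem.Set.add]
  rw [hset]
  have hcony : -2147483648 ≤ cony_loc := by
    simp only [Dom_catch_me, pvDomInt, Bool.and_eq_true, decide_eq_true_eq] at hdom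
    exact hdom.1.1
  apply main_loop cony_loc 65601 0 [brown_loc] (4 ^ 65602) (by simp) ?_ ?_
  · have htri : (triN 65601 : Int) = 2151778401 := by norm_num [triN]
    simp only [cpos, Nat.zero_add, htri]
    omega
  · simp only [List.length_cons, List.length_nil, Nat.zero_add, Nat.one_mul]
    exact Nat.pow_le_pow_right (by norm_num) (by omega)
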